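-- pv_equiv track=rewrite | github.com/jlittle1223/HackUCI | file_util.py | contains_course_name
-- ===== SOURCE A (Python) =====
-- and_string = " and "
--
-- or_string = " or "
--
-- def contains_course_name(course_string:str):
--     max_course_name_length = 10
--     for i in range(len(course_string)):
--         if course_string[i] == ":":
--             return True
--         if and_string in course_string:
--             return True
--         if or_string in course_string:
--             return True
--         if i > max_course_name_length:
--             return False
--
--     return False
-- ===== SOURCE B (Python) =====
-- def contains_course_name(course_string: str):
--     return (" and " in course_string
--             or " or " in course_string
--             or ":" in course_string[:12])
-- ===== Notes on version B (the rewrite author's own statement) =====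
-- stated objective: simpler
-- what changed: Replaced A's character-indexed loop (which rescans the whole string for ' and '/' or ' on every iteration and bails out after index 11) by three direct substring tests: ' and ' in s, ' or ' in s, and ':' in s[:12].
import Mathlib
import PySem

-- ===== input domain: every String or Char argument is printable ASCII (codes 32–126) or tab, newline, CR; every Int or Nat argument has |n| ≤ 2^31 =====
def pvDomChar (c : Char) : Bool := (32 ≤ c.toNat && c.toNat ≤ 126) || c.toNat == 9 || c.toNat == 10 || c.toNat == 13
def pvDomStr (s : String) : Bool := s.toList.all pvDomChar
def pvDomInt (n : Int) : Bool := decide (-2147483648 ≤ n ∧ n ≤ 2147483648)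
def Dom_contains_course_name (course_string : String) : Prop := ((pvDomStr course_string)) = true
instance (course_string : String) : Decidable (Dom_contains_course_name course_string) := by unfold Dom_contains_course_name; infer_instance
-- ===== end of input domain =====

-- B replaces A's index loop (with per-iteration substring rescans) by two substring tests plus a colon test on the first-12-chars slice; objective: simpler.

-- ===== PORT A =====
-- the module constants
def and_string : String := " and "
def or_string : String := " or "

-- the 'for i in range(len(course_string))' loop with its early returns, as structural recursion on the index
def containsA_go (cs : List Char) (i : Nat) : Bool :=
  if h : i < cs.length then
    if cs[i] = ':' then true
    else if PySem.Chars.isIn and_string.toList cs then true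
    else if PySem.Chars.isIn or_string.toList cs then true
    else if (i : Int) > 10 then false
    else containsA_go cs (i + 1)
  else false
termination_by cs.length - i

def contains_course_name (course_string : String) : Bool :=
  containsA_go course_string.toList 0

-- ===== PORT B =====
def contains_course_name_alt (course_string : String) : Bool :=
  PySem.Str.isIn " and " course_string
    || PySem.Str.isIn " or " course_string
    || PySem.Chars.isIn ":".toList (PySem.Chars.slice course_string.toList none (some 12))

-- ===== PRECONDITION & SPEC =====
def Spec_contains_course_name (course_string : String) (out : Bool) : Prop := out = contains_course_name_alt course_string
instance (course_string : String) (out : Bool) : Decidable (Spec_contains_course_name course_string out) := by unfold Spec_contains_course_name; infer_instance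

-- ===== CLAIM (what is proved, stated in full; the proofs are below) =====
def Claim_equal_contains_course_name : Prop := ∀ (course_string : String), Dom_contains_course_name course_string → Spec_contains_course_name course_string (contains_course_name course_string)

-- ===== LEMMAS AND PROOFS =====

lemma singleton_infix_iff {α : Type} (a : α) (l : List α) : [a] <:+: l ↔ a ∈ l := by
  constructor
  · intro h; exact h.sublist.subset (List.mem_singleton_self a)
  · intro h
    obtain ⟨s, t, rfl⟩ := List.append_of_mem h
    exact ⟨s, t, by simp⟩

-- if a nonempty substring occurs, the string is nonempty
lemma ne_nil_of_isIn (sub cs : List Char) (hsub : sub ≠ []) (h : PySem.Chars.isIn sub cs = true) :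
    cs ≠ [] := by
  rw [PySem.Chars.isIn_iff_infix] at h
  intro hnil; subst hnil
  rw [List.infix_nil] at h
  exact hsub h

-- when a substring check succeeds, the loop returns true at its very first iteration
lemma containsA_go_true_of_isIn (cs : List Char)
    (h : PySem.Chars.isIn and_string.toList cs = true ∨ PySem.Chars.isIn or_string.toList cs = true)
    (hne : cs ≠ []) : containsA_go cs 0 = true := by
  rw [containsA_go]
  have hlen : 0 < cs.length := List.length_pos_iff.mpr hne
  rw [dif_pos hlen]
  rcases h with h | h <;> by_cases hc : cs[0] = ':' <;> simp [hc, h]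

-- characterisation of the loop when both substring checks fail: colon search over indices i..11
lemma containsA_go_eq (cs : List Char) (i : Nat) (hi : i ≤ 11)
    (hand : PySem.Chars.isIn and_string.toList cs = false)
    (hor : PySem.Chars.isIn or_string.toList cs = false) :
    (containsA_go cs i = true ↔ ∃ j, i ≤ j ∧ j < min cs.length 12 ∧ cs.getD j ' ' = ':') := by
  induction' hn : 12 - i with n ih generalizing i
  · omega
  · rw [containsA_go]
    by_cases h : i < cs.length
    · rw [dif_pos h]
      by_cases hc : cs[i] = ':'
      · rw [if_pos hc]
        constructor
        · intro _
          refine ⟨i, le_refl i, by omega, ?_⟩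
          rw [List.getD_eq_getElem?_getD, List.getElem?_eq_getElem h]
          exact hc
        · intro _; rfl
      · rw [if_neg hc]
        simp only [hand, hor]
        rw [if_neg (by simp), if_neg (by simp)]
        by_cases h10 : (i : Int) > 10
        · have hi11 : i = 11 := by omega
          rw [if_pos h10]
          constructor
          · intro hh; exact absurd hh (by simp)
          · rintro ⟨j, hj1, hj2, hj3⟩
            exfalso
            have : j = 11 := by omega
            subst this; subst hi11
            rw [List.getD_eq_getElem?_getD, List.getElem?_eq_getElem h] at hj3
            exact hc hj3
        · rw [if_neg h10]
          rw [ih (i + 1) (by omega) (by omega)]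
          constructor
          · rintro ⟨j, hj1, hj2, hj3⟩; exact ⟨j, by omega, hj2, hj3⟩
          · rintro ⟨j, hj1, hj2, hj3⟩
            refine ⟨j, ?_, hj2, hj3⟩
            rcases Nat.eq_or_lt_of_le hj1 with rfl | hlt
            · exfalso
              rw [List.getD_eq_getElem?_getD, List.getElem?_eq_getElem h] at hj3
              exact hc hj3
            · omega
    · rw [dif_neg h]
      constructor
      · intro hh; exact absurd hh (by simp)
      · rintro ⟨j, hj1, hj2, _⟩; exfalso; omega

-- the colon-in-first-12-chars test, as a getD-indexed search
lemma colon_slice_iff (cs : List Char) :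
    (PySem.Chars.isIn ":".toList (PySem.Chars.slice cs none (some 12)) = true ↔
      ∃ j, 0 ≤ j ∧ j < min cs.length 12 ∧ cs.getD j ' ' = ':') := by
  have h12 : PySem.Chars.slice cs none (some 12) = cs.take 12 := by
    exact PySem.List.slice_to cs (by omega)
  rw [h12, PySem.Chars.isIn_iff_infix]
  show [':'] <:+: cs.take 12 ↔ _
  rw [singleton_infix_iff]
  rw [List.mem_iff_getElem]
  constructor
  · rintro ⟨j, hj, hget⟩
    rw [List.getElem_take] at hget
    have hjl : j < cs.length := by simp at hj; omega
    refine ⟨j, by omega, by simp at hj; omega, ?_⟩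
    rw [List.getD_eq_getElem?_getD, List.getElem?_eq_getElem hjl]
    exact hget
  · rintro ⟨j, _, hj, hget⟩
    have hjl : j < cs.length := by omega
    refine ⟨j, by simp; omega, ?_⟩
    rw [List.getElem_take]
    rw [List.getD_eq_getElem?_getD, List.getElem?_eq_getElem hjl] at hget
    exact hget

-- ===== VERDICT (by name: the statement is the Claim_ definition above) =====
theorem contains_course_name_spec : Claim_equal_contains_course_name := by
  intro s _
  unfold Spec_contains_course_name contains_course_name contains_course_name_alt
  have hand_eq : PySem.Str.isIn " and " s = PySem.Chars.isIn and_string.toList s.toList := by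
    simp [PySem.Str.isIn, and_string]
  have hor_eq : PySem.Str.isIn " or " s = PySem.Chars.isIn or_string.toList s.toList := by
    simp [PySem.Str.isIn, or_string]
  rw [hand_eq, hor_eq]
  set cs := s.toList with hcs
  by_cases hand : PySem.Chars.isIn and_string.toList cs = true
  · have hne := ne_nil_of_isIn _ cs (by decide) hand
    rw [containsA_go_true_of_isIn cs (Or.inl hand) hne, hand]
    simp
  · by_cases hor : PySem.Chars.isIn or_string.toList cs = true
    · have hne := ne_nil_of_isIn _ cs (by decide) hor
      rw [containsA_go_true_of_isIn cs (Or.inr hor) hne, hor]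
      simp
    · rw [Bool.not_eq_true] at hand hor
      rw [hand, hor]
      simp only [Bool.false_or]
      rw [Bool.eq_iff_iff, containsA_go_eq cs 0 (by omega) hand hor, colon_slice_iff]
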